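-- pv_equiv track=rewrite | github.com/hys-913/dual-criterion-noise-regulation-fall-detection | scripts/generate_tables.py | build_physical_table
-- ===== SOURCE A (Python) =====
-- from collections import Counter, defaultdict
--
-- def build_physical_table(rows):
--     flag_key = "quality_flag" if rows and "quality_flag" in rows[0] else "removed"
--     by_split = Counter()
--     total_flagged = 0
--     for row in rows:
--         flagged = str(row.get(flag_key, "")).lower() == "true"
--         if flagged:
--             total_flagged += 1
--             by_split[row.get("split", "unknown")] += 1
--
--     return rf"""
-- \begin{{table}}[tb]
-- \caption{{Physical-quality audit summary from \texttt{{physical\_scores.csv}}.}}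
-- \label{{tab:artifact_physical}}
-- \centering
-- \begin{{tabular}}{{lcc}}
-- \toprule
-- Scope & Samples & Flagged \\
-- \midrule
-- Train & {sum(1 for r in rows if r.get("split") == "train")} & {by_split["train"]} \\
-- Validation & {sum(1 for r in rows if r.get("split") == "val")} & {by_split["val"]} \\
-- Test & {sum(1 for r in rows if r.get("split") == "test")} & {by_split["test"]} \\
-- \midrule
-- All benchmark images & {len(rows)} & {total_flagged} \\
-- \bottomrule
-- \end{{tabular}}
-- \end{{table}}
-- """
-- ===== SOURCE B (Python) =====
-- def build_physical_table(rows):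
--     flag_key = "quality_flag" if rows and "quality_flag" in rows[0] else "removed"
--     total = 0
--     total_flagged = 0
--     n_train = f_train = 0
--     n_val = f_val = 0
--     n_test = f_test = 0
--     for row in rows:
--         total += 1
--         flagged = str(row.get(flag_key, "")).lower() == "true"
--         if flagged:
--             total_flagged += 1
--         split = row.get("split")
--         if split == "train":
--             n_train += 1
--             if flagged:
--                 f_train += 1
--         elif split == "val":
--             n_val += 1
--             if flagged:
--                 f_val += 1
--         elif split == "test":
--             n_test += 1
--             if flagged:
--                 f_test += 1
--     return rf"""
-- \begin{{table}}[tb]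
-- \caption{{Physical-quality audit summary from \texttt{{physical\_scores.csv}}.}}
-- \label{{tab:artifact_physical}}
-- \centering
-- \begin{{tabular}}{{lcc}}
-- \toprule
-- Scope & Samples & Flagged \\
-- \midrule
-- Train & {n_train} & {f_train} \\
-- Validation & {n_val} & {f_val} \\
-- Test & {n_test} & {f_test} \\
-- \midrule
-- All benchmark images & {total} & {total_flagged} \\
-- \bottomrule
-- \end{{tabular}}
-- \end{{table}}
-- """
-- ===== Notes on version B (the rewrite author's own statement) =====
-- stated objective: simpler
-- what changed: Replaces the Counter keyed by split plus three separate sum(...) scans and len(rows) with a single loop over rows that maintains plain scalar counters (per-split sample and flagged counts, overall total and flagged total), so the table is filled from one pass.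
import Mathlib
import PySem

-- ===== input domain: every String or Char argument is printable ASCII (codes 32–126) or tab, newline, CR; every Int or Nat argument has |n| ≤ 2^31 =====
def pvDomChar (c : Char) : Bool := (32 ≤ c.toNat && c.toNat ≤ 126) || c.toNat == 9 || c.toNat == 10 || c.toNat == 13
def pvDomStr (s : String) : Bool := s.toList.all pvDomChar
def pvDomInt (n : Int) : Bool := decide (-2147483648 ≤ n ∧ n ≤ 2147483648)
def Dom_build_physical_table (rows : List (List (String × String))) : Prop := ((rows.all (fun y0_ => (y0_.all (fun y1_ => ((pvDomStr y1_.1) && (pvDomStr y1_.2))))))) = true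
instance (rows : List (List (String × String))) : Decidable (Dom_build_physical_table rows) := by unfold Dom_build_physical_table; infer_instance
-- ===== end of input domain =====

-- B replaces A's Counter-by-split plus three separate sum(...) scans with one loop over rows
-- maintaining plain scalar counters (objective: simpler, one pass).

-- shared by both ports (identical line in both Pythons): flag_key selection and the flag test
def pvFlagKey (rows : List (List (String × String))) : String :=
  match rows with
  | [] => "removed"
  | r :: _ => if (PySem.Dict.mk r).contains "quality_flag" then "quality_flag" else "removed"

def pvFlagged (fk : String) (row : List (String × String)) : Bool :=
  PySem.Str.lower ((PySem.Dict.mk row).getD fk "") == "true"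

-- the constant LaTeX skeleton of the returned f-string, shared verbatim by both Pythons
def pvTmpl (tr trf va vaf te tef al alf : String) : String :=
  PySem.Str.join ""
    ["\n\\begin{table}[tb]\n\\caption{Physical-quality audit summary from \\texttt{physical\\_scores.csv}.}\n\\label{tab:artifact_physical}\n\\centering\n\\begin{tabular}{lcc}\n\\toprule\nScope & Samples & Flagged \\\\\n\\midrule\nTrain & ",
     tr, " & ", trf,
     " \\\\\nValidation & ", va, " & ", vaf,
     " \\\\\nTest & ", te, " & ", tef,
     " \\\\\n\\midrule\nAll benchmark images & ", al, " & ", alf,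
     " \\\\\n\\bottomrule\n\\end{tabular}\n\\end{table}\n"]

-- ===== PORT A =====
-- A's loop: Counter by_split over row.get("split","unknown") for flagged rows + total_flagged
def pvStepA (fk : String) (s : PySem.Dict String Int × Int) (row : List (String × String)) :
    PySem.Dict String Int × Int :=
  if pvFlagged fk row then
    (s.1.modify (((PySem.Dict.mk row).get? "split").getD "unknown") 0 (· + 1), s.2 + 1)
  else s

def build_physical_table (rows : List (List (String × String))) : String :=
  let fk := pvFlagKey rows
  let st := rows.foldl (pvStepA fk) (PySem.Dict.empty, 0)
  let by_split := st.1
  let total_flagged := st.2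
  pvTmpl
    (PySem.Int.toStr (rows.foldl (fun acc r => if ((PySem.Dict.mk r).get? "split") == some "train" then acc + 1 else acc) 0))
    (PySem.Int.toStr (by_split.getD "train" 0))
    (PySem.Int.toStr (rows.foldl (fun acc r => if ((PySem.Dict.mk r).get? "split") == some "val" then acc + 1 else acc) 0))
    (PySem.Int.toStr (by_split.getD "val" 0))
    (PySem.Int.toStr (rows.foldl (fun acc r => if ((PySem.Dict.mk r).get? "split") == some "test" then acc + 1 else acc) 0))
    (PySem.Int.toStr (by_split.getD "test" 0))
    (PySem.Int.toStr (rows.length : Int))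
    (PySem.Int.toStr total_flagged)

-- ===== PORT B =====
-- B's loop state: total, total_flagged, and per-split sample/flagged counters
structure PvBS where
  total : Int
  tf : Int
  ntr : Int
  ftr : Int
  nva : Int
  fva : Int
  nte : Int
  fte : Int
deriving DecidableEq, Repr

def pvStepB (fk : String) (s : PvBS) (row : List (String × String)) : PvBS :=
  let s := { s with total := s.total + 1 }
  let fl := pvFlagged fk row
  let s := if fl then { s with tf := s.tf + 1 } else s
  let sp := (PySem.Dict.mk row).get? "split"
  if sp == some "train" then
    let s := { s with ntr := s.ntr + 1 }
    if fl then { s with ftr := s.ftr + 1 } else s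
  else if sp == some "val" then
    let s := { s with nva := s.nva + 1 }
    if fl then { s with fva := s.fva + 1 } else s
  else if sp == some "test" then
    let s := { s with nte := s.nte + 1 }
    if fl then { s with fte := s.fte + 1 } else s
  else s

def build_physical_table_alt (rows : List (List (String × String))) : String :=
  let fk := pvFlagKey rows
  let s := rows.foldl (pvStepB fk) ⟨0, 0, 0, 0, 0, 0, 0, 0⟩
  pvTmpl
    (PySem.Int.toStr s.ntr) (PySem.Int.toStr s.ftr)
    (PySem.Int.toStr s.nva) (PySem.Int.toStr s.fva)
    (PySem.Int.toStr s.nte) (PySem.Int.toStr s.fte)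
    (PySem.Int.toStr s.total) (PySem.Int.toStr s.tf)

-- ===== PRECONDITION & SPEC =====
def Spec_build_physical_table (rows : List (List (String × String))) (out : String) : Prop := out = build_physical_table_alt rows
instance (rows : List (List (String × String))) (out : String) : Decidable (Spec_build_physical_table rows out) := by unfold Spec_build_physical_table; infer_instance

-- ===== CLAIM (what is proved, stated in full; the proofs are below) =====
def Claim_equal_build_physical_table : Prop := ∀ (rows : List (List (String × String))), Dom_build_physical_table rows → Spec_build_physical_table rows (build_physical_table rows)

-- ===== LEMMAS AND PROOFS =====

-- A's Counter key test agrees with the plain split test for the three printed splits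
lemma pvKey_eq (r : List (String × String)) (k : String) (hk : k ≠ "unknown") :
    ((((PySem.Dict.mk r).get? "split").getD "unknown") == k) =
      (((PySem.Dict.mk r).get? "split") == some k) := by
  cases h : (PySem.Dict.mk r).get? "split" with
  | none => simp [Ne.symm hk]
  | some s => simp

lemma pvStepA_false {fk : String} {row : List (String × String)}
    (h : pvFlagged fk row = false) (s : PySem.Dict String Int × Int) :
    pvStepA fk s row = s := by
  simp [pvStepA, h]

lemma pvStepA_true {fk : String} {row : List (String × String)}
    (h : pvFlagged fk row = true) (s : PySem.Dict String Int × Int) :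
    pvStepA fk s row =
      (s.1.modify (((PySem.Dict.mk row).get? "split").getD "unknown") 0 (· + 1), s.2 + 1) := by
  simp [pvStepA, h]

lemma pvFoldA_snd (fk : String) (rows : List (List (String × String)))
    (d : PySem.Dict String Int) (t : Int) :
    (rows.foldl (pvStepA fk) (d, t)).2 = t + (rows.countP (pvFlagged fk) : Int) := by
  induction rows generalizing d t with
  | nil => simp
  | cons r rs ih =>
    rw [List.foldl_cons]
    cases h : pvFlagged fk r with
    | false => rw [pvStepA_false h, ih]; simp [h]
    | true =>
      rw [pvStepA_true h, ih]
      simp [List.countP_cons, h]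
      ring

lemma pvFoldA_getD (fk : String) (rows : List (List (String × String)))
    (d : PySem.Dict String Int) (t : Int) (k : String) :
    ((rows.foldl (pvStepA fk) (d, t)).1).getD k 0 =
      d.getD k 0 + (rows.countP (fun r => pvFlagged fk r &&
        ((((PySem.Dict.mk r).get? "split").getD "unknown") == k)) : Int) := by
  induction rows generalizing d t with
  | nil => simp
  | cons r rs ih =>
    rw [List.foldl_cons]
    cases h : pvFlagged fk r with
    | false => rw [pvStepA_false h, ih]; simp [h]
    | true =>
      rw [pvStepA_true h, ih, PySem.Dict.getD_modify]
      simp only [List.countP_cons, h, Bool.true_and]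
      by_cases hk : k = (((PySem.Dict.mk r).get? "split").getD "unknown")
      · simp [hk]; ring
      · have hne : ((((PySem.Dict.mk r).get? "split").getD "unknown") == k) = false := by
          simp; exact fun h' => hk h'.symm
        simp [hk, hne]

lemma pvStepB_eq (fk : String) (s : PvBS) (row : List (String × String)) :
    pvStepB fk s row =
      ⟨s.total + 1,
       s.tf + (if pvFlagged fk row then 1 else 0),
       s.ntr + (if ((PySem.Dict.mk row).get? "split") == some "train" then 1 else 0),
       s.ftr + (if (((PySem.Dict.mk row).get? "split") == some "train") && pvFlagged fk row then 1 else 0),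
       s.nva + (if ((PySem.Dict.mk row).get? "split") == some "val" then 1 else 0),
       s.fva + (if (((PySem.Dict.mk row).get? "split") == some "val") && pvFlagged fk row then 1 else 0),
       s.nte + (if ((PySem.Dict.mk row).get? "split") == some "test" then 1 else 0),
       s.fte + (if (((PySem.Dict.mk row).get? "split") == some "test") && pvFlagged fk row then 1 else 0)⟩ := by
  unfold pvStepB
  rcases hsp : (PySem.Dict.mk row).get? "split" with _ | v
  · cases hfl : pvFlagged fk row <;> simp [hsp, hfl]
  · cases hfl : pvFlagged fk row <;>
      by_cases htr : v = "train" <;>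
      by_cases hva : v = "val" <;>
      by_cases hte : v = "test" <;>
      simp [hsp, hfl, htr, hva, hte]

lemma pvFoldB (fk : String) (rows : List (List (String × String))) (s : PvBS) :
    rows.foldl (pvStepB fk) s =
      ⟨s.total + (rows.length : Int),
       s.tf + (rows.countP (pvFlagged fk) : Int),
       s.ntr + (rows.countP (fun r => ((PySem.Dict.mk r).get? "split") == some "train") : Int),
       s.ftr + (rows.countP (fun r => (((PySem.Dict.mk r).get? "split") == some "train") && pvFlagged fk r) : Int),
       s.nva + (rows.countP (fun r => ((PySem.Dict.mk r).get? "split") == some "val") : Int),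
       s.fva + (rows.countP (fun r => (((PySem.Dict.mk r).get? "split") == some "val") && pvFlagged fk r) : Int),
       s.nte + (rows.countP (fun r => ((PySem.Dict.mk r).get? "split") == some "test") : Int),
       s.fte + (rows.countP (fun r => (((PySem.Dict.mk r).get? "split") == some "test") && pvFlagged fk r) : Int)⟩ := by
  induction rows generalizing s with
  | nil => simp
  | cons r rs ih =>
    rw [List.foldl_cons, pvStepB_eq, ih]
    simp only [List.countP_cons, List.length_cons, PvBS.mk.injEq]
    refine ⟨?_, ?_, ?_, ?_, ?_, ?_, ?_, ?_⟩ <;> push_cast <;> ring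

lemma pvCount_if (p : List (String × String) → Bool) (rows : List (List (String × String))) :
    rows.foldl (fun acc r => if p r then acc + 1 else acc) (0 : Int) = (rows.countP p : Int) := by
  rw [PySem.List.foldl_if_add_one]; ring

lemma pvFlaggedCount_eq (fk k : String) (hk : k ≠ "unknown")
    (rows : List (List (String × String))) :
    rows.countP (fun r => pvFlagged fk r &&
        ((((PySem.Dict.mk r).get? "split").getD "unknown") == k)) =
      rows.countP (fun r => (((PySem.Dict.mk r).get? "split") == some k) && pvFlagged fk r) := by
  apply List.countP_congr
  intro r _
  rw [pvKey_eq r k hk, Bool.and_comm]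

-- ===== VERDICT (by name: the statement is the Claim_ definition above) =====
theorem build_physical_table_spec : Claim_equal_build_physical_table := by
  intro rows _
  unfold Spec_build_physical_table build_physical_table build_physical_table_alt
  simp only [pvFoldB, pvFoldA_snd, pvFoldA_getD, pvCount_if, PySem.Dict.getD_empty, zero_add]
  rw [pvFlaggedCount_eq (pvFlagKey rows) "train" (by decide) rows,
      pvFlaggedCount_eq (pvFlagKey rows) "val" (by decide) rows,
      pvFlaggedCount_eq (pvFlagKey rows) "test" (by decide) rows]
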